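-- pv_equiv track=rewrite | github.com/rtehok/perso-python | leetcode/1420_build-array-where-you-can-find-the-maximum-exactly-k-comparisons.py | numOfArraysBottomUp
-- ===== SOURCE A (Python) =====
-- def numOfArraysBottomUp(n: int, m: int, k: int) -> int:
--     dp = [[[0] * (k + 1) for _ in range(m + 1)] for _ in range(n + 1)]
--
--     MOD = 10 ** 9 + 7
--
--     for num in range(len(dp[0])):
--         dp[n][num][0] = 1  # base case in top-down approach
--
--     for i in range(n - 1, -1, -1):
--         for max_so_far in range(m, -1, -1):
--             for remain in range(k + 1):
--                 ans = (max_so_far * dp[i + 1][max_so_far][remain]) % MOD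
--
--                 if remain > 0:
--                     for num in range(max_so_far + 1, m + 1):
--                         ans = (ans + dp[i + 1][num][remain - 1]) % MOD
--
--                 dp[i][max_so_far][remain] = ans
--
--     return dp[0][0][k]
-- ===== SOURCE B (Python) =====
-- def numOfArraysBottomUp(n: int, m: int, k: int) -> int:
--     MOD = 10 ** 9 + 7
--     # dp[max_so_far][remain]: one rolling 2-D row; A's inner re-summation is
--     # replaced by suffix sums, so each of the n steps costs O(m*k) not O(m^2*k).
--     dp = [[1 if r == 0 else 0 for r in range(k + 1)] for _ in range(m + 1)]
--     for _ in range(n):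
--         # suf[num][r] = sum(dp[v][r] for v in range(num, m + 1)) % MOD
--         suf = [[0] * (k + 1)]
--         for num in range(m, -1, -1):
--             head = suf[0]
--             row = dp[num]
--             suf.insert(0, [(head[r] + row[r]) % MOD for r in range(k + 1)])
--         new = []
--         for ms in range(m + 1):
--             row = []
--             for r in range(k + 1):
--                 v = (ms * dp[ms][r]) % MOD
--                 if r > 0:
--                     v = (v + suf[ms + 1][r - 1]) % MOD
--                 row.append(v)
--             new.append(row)
--         dp = new
--     return dp[0][k]
-- ===== Notes on version B (the rewrite author's own statement) =====
-- stated objective: faster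
-- what changed: B replaces A's (n+1)x(m+1)x(k+1) table and its O(m) inner re-summation by a single rolling 2-D row updated n times with precomputed suffix sums over num, dropping a factor of m.
import Mathlib
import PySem

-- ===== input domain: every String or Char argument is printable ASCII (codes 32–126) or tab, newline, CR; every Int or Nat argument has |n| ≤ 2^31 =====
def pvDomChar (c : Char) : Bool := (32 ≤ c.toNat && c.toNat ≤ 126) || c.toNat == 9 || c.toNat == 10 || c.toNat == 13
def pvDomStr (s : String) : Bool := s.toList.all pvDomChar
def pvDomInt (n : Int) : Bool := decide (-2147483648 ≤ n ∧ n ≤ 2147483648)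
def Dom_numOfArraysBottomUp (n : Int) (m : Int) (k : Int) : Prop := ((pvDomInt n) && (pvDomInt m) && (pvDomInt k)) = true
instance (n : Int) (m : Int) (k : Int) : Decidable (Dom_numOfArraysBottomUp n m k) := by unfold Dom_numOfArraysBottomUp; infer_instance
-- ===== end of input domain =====

-- B replaces A's 3-D table and its O(m) inner re-summation by a rolling 2-D row updated with
-- precomputed suffix sums (objective: faster; a timing run measures the speed-up).

-- ===== PORT A =====
-- A's 3-D Python list dp is modelled as an updatable map wrapped in a one-field
-- structure (dp.get i ms r = dp[i][ms][r]); each Python loop is the fold over the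
-- same index sequence, each dp[...] = ans assignment is a pointwise update.
def pvMOD : Int := 1000000007

structure PvTbl where
  get : Nat → Nat → Nat → Int

-- pointwise update dp[i][ms][r] := ans of the table
def pvUpd (dp : PvTbl) (i ms r : Nat) (ans : Int) : PvTbl :=
  ⟨fun a b c => if a = i ∧ b = ms ∧ c = r then ans else dp.get a b c⟩

-- body of A's innermost assignment loop over remain = r (reads row i+1, writes dp[i][ms][r])
def pvBodyR (M : Nat) (i ms : Nat) (dp : PvTbl) (r : Nat) : PvTbl :=
  let ans0 : Int := ((ms : Int) * dp.get (i+1) ms r) % pvMOD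
  let ans : Int :=
    if 0 < r then
      -- for num in range(max_so_far+1, m+1): ans = (ans + dp[i+1][num][remain-1]) % MOD
      (List.range' (ms+1) (M - ms)).foldl (fun a num => (a + dp.get (i+1) num (r-1)) % pvMOD) ans0
    else ans0
  pvUpd dp i ms r ans

-- for remain in range(k+1)
def pvBodyMs (M K : Nat) (i : Nat) (dp : PvTbl) (ms : Nat) : PvTbl :=
  (List.range (K+1)).foldl (pvBodyR M i ms) dp

-- for max_so_far in range(m, -1, -1)
def pvBodyI (M K : Nat) (dp : PvTbl) (i : Nat) : PvTbl :=
  ((List.range (M+1)).reverse).foldl (pvBodyMs M K i) dp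

def numOfArraysBottomUp (n : Int) (m : Int) (k : Int) : Int :=
  -- dp = all-zero table; for num in range(m+1): dp[n][num][0] = 1
  (((List.range n.toNat).reverse).foldl (pvBodyI m.toNat k.toNat)
    ((List.range (m.toNat+1)).foldl
      (fun dp num => PvTbl.mk (fun a b c => if a = n.toNat ∧ b = num ∧ c = 0 then (1 : Int) else dp.get a b c))
      (PvTbl.mk (fun _ _ _ => (0 : Int))))).get
    0 0 k.toNat                                   -- return dp[0][0][k]

-- ===== PORT B =====
-- suf = [[0]*(k+1)]; for num in range(m,-1,-1): suf.insert(0, [(suf[0][r]+dp[num][r])%MOD ...])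
def pvSufB (M K : Nat) (dp : List (List Int)) : List (List Int) :=
  ((List.range (M+1)).reverse).foldl
    (fun suf num =>
      ((List.range (K+1)).map
        (fun r => ((suf.headD []).getD r 0 + ((dp.getD num []).getD r 0)) % pvMOD)) :: suf)
    [List.replicate (K+1) (0 : Int)]

-- the value appended for (ms, r): v = (ms*dp[ms][r])%MOD; if r>0: v = (v+suf[ms+1][r-1])%MOD
def pvValB (dp suf : List (List Int)) (ms r : Nat) : Int :=
  let v : Int := ((ms : Int) * ((dp.getD ms []).getD r 0)) % pvMOD
  if 0 < r then (v + ((suf.getD (ms+1) []).getD (r-1) 0)) % pvMOD else v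

-- one rolling update: new[ms][r] built by the two append loops of Source B
def pvStepB (M K : Nat) (dp : List (List Int)) : List (List Int) :=
  let suf := pvSufB M K dp
  (List.range (M+1)).foldl
    (fun acc ms =>
      acc ++ [(List.range (K+1)).foldl (fun rowAcc r => rowAcc ++ [pvValB dp suf ms r]) []]) []

def numOfArraysBottomUp_alt (n : Int) (m : Int) (k : Int) : Int :=
  (((List.range n.toNat).foldl (fun dp _ => pvStepB m.toNat k.toNat dp)
      -- dp = [[1 if r == 0 else 0 for r in range(k+1)] for _ in range(m+1)]
      ((List.range (m.toNat+1)).map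
        (fun _ => (List.range (k.toNat+1)).map (fun r => if r = 0 then (1 : Int) else 0)))).getD 0 []).getD
    k.toNat 0                                     -- return dp[0][k]

-- ===== PRECONDITION & SPEC =====
-- Python A raises IndexError whenever n < 0, m < 0 or k < 0 (the table gets empty rows); it returns on all other ints.
def Pre_numOfArraysBottomUp (n : Int) (m : Int) (k : Int) : Prop := 0 ≤ n ∧ 0 ≤ m ∧ 0 ≤ k
instance (n : Int) (m : Int) (k : Int) : Decidable (Pre_numOfArraysBottomUp n m k) := by
  unfold Pre_numOfArraysBottomUp; infer_instance

def pvWitness_numOfArraysBottomUp : Int × Int × Int := (2, 2, 1)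

def Spec_numOfArraysBottomUp (n : Int) (m : Int) (k : Int) (out : Int) : Prop := out = numOfArraysBottomUp_alt n m k
instance (n : Int) (m : Int) (k : Int) (out : Int) : Decidable (Spec_numOfArraysBottomUp n m k out) := by unfold Spec_numOfArraysBottomUp; infer_instance

-- ===== CLAIM (what is proved, stated in full; the proofs are below) =====
def Claim_equal_numOfArraysBottomUp : Prop := ∀ (n : Int) (m : Int) (k : Int), Dom_numOfArraysBottomUp n m k → Pre_numOfArraysBottomUp n m k → Spec_numOfArraysBottomUp n m k (numOfArraysBottomUp n m k)

-- ===== LEMMAS AND PROOFS =====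

-- common mathematical shape: the DP step and its iterate
def pvBase : Nat → Nat → Int := fun _ c => if c = 0 then 1 else 0

def pvEntry (M : Nat) (G : Nat → Nat → Int) (ms r : Nat) : Int :=
  if 0 < r then
    ((ms : Int) * G ms r + ((List.range' (ms+1) (M - ms)).map (fun num => G num (r-1))).sum) % pvMOD
  else ((ms : Int) * G ms r) % pvMOD

def pvIter (M : Nat) : Nat → (Nat → Nat → Int) → Nat → Nat → Int
  | 0, G => G
  | j+1, G => pvIter M j (pvEntry M G)

def pvMkRow (K : Nat) (f : Nat → Int) : List Int := (List.range (K+1)).map f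
def pvMkMat (M K : Nat) (G : Nat → Nat → Int) : List (List Int) :=
  (List.range (M+1)).map (fun b => pvMkRow K (G b))

def pvSufVal (M : Nat) (q : Nat → Nat → Int) (num c : Nat) : Int :=
  ((List.range' num (M + 1 - num)).map (fun v => q v c)).sum % pvMOD

-- mod-folding a running sum equals one mod of the whole sum
lemma pv_mod_fold (f : Nat → Int) (L : List Nat) : ∀ c : Int,
    L.foldl (fun a x => (a + f x) % pvMOD) (c % pvMOD) = (c + (L.map f).sum) % pvMOD := by
  induction L with
  | nil => intro c; simp
  | cons x L ih =>
    intro c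
    have h1 : (c % pvMOD + f x) % pvMOD = (c + f x) % pvMOD := Int.emod_add_emod c pvMOD (f x)
    simp only [List.foldl_cons, h1, ih, List.map_cons, List.sum_cons]
    ring_nf

lemma pv_foldl_append_map {α β : Type} (f : α → β) : ∀ (L : List α) (acc : List β),
    L.foldl (fun acc x => acc ++ [f x]) acc = acc ++ L.map f := by
  intro L
  induction L with
  | nil => intro acc; simp
  | cons x L ih => intro acc; simp [ih]

lemma pv_getD_map_range {α : Type} (f : Nat → α) (i n : Nat) (d : α) (h : i < n) :
    ((List.range n).map f).getD i d = f i := by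
  simp [List.getD_eq_getElem?_getD, List.getElem?_map, List.getElem?_range h]

-- ---- A side ----
lemma pv_get_mk (f : Nat → Nat → Nat → Int) : (PvTbl.mk f).get = f := rfl

lemma pvA_baseFold (N : Nat) : ∀ (L : List Nat) (dp : PvTbl) (a b c : Nat),
    (L.foldl (fun dp num => PvTbl.mk (fun a b c => if a = N ∧ b = num ∧ c = 0 then (1 : Int) else dp.get a b c)) dp).get a b c
      = if a = N ∧ b ∈ L ∧ c = 0 then 1 else dp.get a b c := by
  intro L
  induction L with
  | nil => intro dp a b c; simp
  | cons x L ih =>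
    intro dp a b c
    simp only [List.foldl_cons, ih, List.mem_cons]
    split_ifs with h1 h2 h3 <;> first | rfl | tauto

lemma pvA_rstep_frame (M : Nat) (i ms r : Nat) (dp : PvTbl) (a b c : Nat)
    (h : ¬(a = i ∧ b = ms ∧ c = r)) : (pvBodyR M i ms dp r).get a b c = dp.get a b c := by
  simp only [pvBodyR, pvUpd, pv_get_mk]
  rw [if_neg h]

lemma pvA_rstep_entry (M K : Nat) (i ms r : Nat) (dp : PvTbl) (G : Nat → Nat → Int)
    (h : ∀ b c, b ≤ M → c ≤ K → dp.get (i+1) b c = G b c) (hms : ms ≤ M) (hr : r ≤ K) :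
    (pvBodyR M i ms dp r).get i ms r = pvEntry M G ms r := by
  simp only [pvBodyR, pvUpd, pv_get_mk, pvEntry, and_self, if_true]
  by_cases hr0 : 0 < r
  · rw [if_pos hr0, if_pos hr0]
    have hmap : (List.range' (ms+1) (M - ms)).map (fun num => dp.get (i+1) num (r-1))
        = (List.range' (ms+1) (M - ms)).map (fun num => G num (r-1)) := by
      apply List.map_congr_left
      intro num hnum
      rw [List.mem_range'_1] at hnum
      exact h num (r-1) (by omega) (by omega)
    rw [h ms r hms hr, pv_mod_fold (fun num => dp.get (i+1) num (r-1)), hmap]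
  · rw [if_neg hr0, if_neg hr0, h ms r hms hr]

lemma pvA_rfold (M K : Nat) (i ms : Nat) (G : Nat → Nat → Int) :
    ∀ (L : List Nat) (dp : PvTbl), (∀ x ∈ L, x ≤ K) → ms ≤ M →
    (∀ b c, b ≤ M → c ≤ K → dp.get (i+1) b c = G b c) →
    (∀ a b c, ¬(a = i ∧ b = ms) → (L.foldl (pvBodyR M i ms) dp).get a b c = dp.get a b c)
    ∧ (∀ c ∈ L, (L.foldl (pvBodyR M i ms) dp).get i ms c = pvEntry M G ms c)
    ∧ (∀ c, c ∉ L → (L.foldl (pvBodyR M i ms) dp).get i ms c = dp.get i ms c) := by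
  intro L
  induction L with
  | nil =>
    intro dp _ _ _
    exact ⟨fun a b c _ => rfl, by simp, fun c _ => rfl⟩
  | cons r L ih =>
    intro dp hK hms hbox
    have hbox1 : ∀ b c, b ≤ M → c ≤ K → (pvBodyR M i ms dp r).get (i+1) b c = G b c := by
      intro b c hb hc
      rw [pvA_rstep_frame M i ms r dp _ _ _ (by intro hcon; omega)]
      exact hbox b c hb hc
    obtain ⟨f1, f2, f3⟩ := ih (pvBodyR M i ms dp r) (fun x hx => hK x (List.mem_cons_of_mem _ hx)) hms hbox1
    refine ⟨?_, ?_, ?_⟩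
    · intro a b c hne
      rw [List.foldl_cons, f1 a b c hne, pvA_rstep_frame M i ms r dp a b c (by tauto)]
    · intro c hc
      rw [List.foldl_cons]
      rcases List.mem_cons.mp hc with hcr | hcL
      · subst hcr
        by_cases hcL2 : c ∈ L
        · exact f2 c hcL2
        · rw [f3 c hcL2, pvA_rstep_entry M K i ms c dp G hbox hms (hK c (by simp))]
      · exact f2 c hcL
    · intro c hc
      rw [List.foldl_cons, f3 c (fun hx => hc (List.mem_cons_of_mem _ hx)),
        pvA_rstep_frame M i ms r dp i ms c (by simp at hc; tauto)]

lemma pvA_msfold (M K : Nat) (i : Nat) (G : Nat → Nat → Int) :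
    ∀ (L : List Nat) (dp : PvTbl), (∀ x ∈ L, x ≤ M) →
    (∀ b c, b ≤ M → c ≤ K → dp.get (i+1) b c = G b c) →
    (∀ a b c, a ≠ i → (L.foldl (pvBodyMs M K i) dp).get a b c = dp.get a b c)
    ∧ (∀ b ∈ L, ∀ c, c ≤ K → (L.foldl (pvBodyMs M K i) dp).get i b c = pvEntry M G b c)
    ∧ (∀ b c, b ∉ L → (L.foldl (pvBodyMs M K i) dp).get i b c = dp.get i b c) := by
  intro L
  induction L with
  | nil =>
    intro dp _ _
    exact ⟨fun a b c _ => rfl, by simp, fun b c _ => rfl⟩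
  | cons ms L ih =>
    intro dp hM hbox
    have hms : ms ≤ M := hM ms (by simp)
    obtain ⟨g1, g2, g3⟩ := pvA_rfold M K i ms G (List.range (K+1)) dp
      (fun x hx => by have := List.mem_range.mp hx; omega) hms hbox
    have hbox1 : ∀ b c, b ≤ M → c ≤ K → (pvBodyMs M K i dp ms).get (i+1) b c = G b c := by
      intro b c hb hc
      rw [pvBodyMs, g1 (i+1) b c (by intro hcon; omega)]
      exact hbox b c hb hc
    obtain ⟨f1, f2, f3⟩ := ih (pvBodyMs M K i dp ms) (fun x hx => hM x (List.mem_cons_of_mem _ hx)) hbox1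
    refine ⟨?_, ?_, ?_⟩
    · intro a b c hne
      rw [List.foldl_cons, f1 a b c hne, pvBodyMs, g1 a b c (by tauto)]
    · intro b hb c hc
      rw [List.foldl_cons]
      rcases List.mem_cons.mp hb with hbm | hbL
      · subst hbm
        by_cases hbL2 : b ∈ L
        · exact f2 b hbL2 c hc
        · rw [f3 b c hbL2, pvBodyMs, g2 c (List.mem_range.mpr (by omega))]
      · exact f2 b hbL c hc
    · intro b c hb
      rw [List.foldl_cons, f3 b c (fun hx => hb (List.mem_cons_of_mem _ hx)),
        pvBodyMs, g1 i b c (by simp at hb; tauto)]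

lemma pvA_loop (M K : Nat) : ∀ (i : Nat) (dp : PvTbl) (G : Nat → Nat → Int),
    (∀ b c, b ≤ M → c ≤ K → dp.get i b c = G b c) →
    ∀ b c, b ≤ M → c ≤ K →
      (((List.range i).reverse).foldl (pvBodyI M K) dp).get 0 b c = pvIter M i G b c := by
  intro i
  induction i with
  | zero =>
    intro dp G h b c hb hc
    simpa using h b c hb hc
  | succ i ih =>
    intro dp G h b c hb hc
    have hrev : (List.range (i+1)).reverse = i :: (List.range i).reverse := by
      rw [List.range_succ, List.reverse_append]; rfl
    rw [hrev, List.foldl_cons]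
    obtain ⟨f1, f2, _⟩ := pvA_msfold M K i G ((List.range (M+1)).reverse) dp
      (fun x hx => by have := List.mem_range.mp (List.mem_reverse.mp hx); omega) h
    have hnext : ∀ b c, b ≤ M → c ≤ K → (pvBodyI M K dp i).get i b c = pvEntry M G b c := by
      intro b c hb hc
      exact f2 b (List.mem_reverse.mpr (List.mem_range.mpr (by omega))) c hc
    exact ih (pvBodyI M K dp i) (pvEntry M G) hnext b c hb hc

lemma pvA_eq (n m k : Int) :
    numOfArraysBottomUp n m k = pvIter m.toNat n.toNat pvBase 0 k.toNat := by
  unfold numOfArraysBottomUp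
  apply pvA_loop m.toNat k.toNat n.toNat _ pvBase _ 0 k.toNat (Nat.zero_le _) (Nat.le_refl _)
  intro b c hb hc
  rw [pvA_baseFold]
  have hb' : b ∈ List.range (m.toNat+1) := List.mem_range.mpr (by omega)
  by_cases hc0 : c = 0
  · rw [if_pos ⟨rfl, hb', hc0⟩]
    simp [pvBase, hc0]
  · rw [if_neg (by tauto)]
    simp [pvBase, hc0]

-- ---- B side ----
lemma pvB_mk_getD (M K : Nat) (G : Nat → Nat → Int) (b c : Nat) (hb : b ≤ M) (hc : c ≤ K) :
    ((pvMkMat M K G).getD b []).getD c 0 = G b c := by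
  unfold pvMkMat pvMkRow
  rw [pv_getD_map_range _ b _ _ (by omega), pv_getD_map_range _ c _ _ (by omega)]

lemma pvB_suf (M K : Nat) (q : Nat → Nat → Int) (dp : List (List Int))
    (hdp : ∀ b c, b ≤ M → c ≤ K → (dp.getD b []).getD c 0 = q b c) :
    pvSufB M K dp = (List.range' 0 (M+2)).map (fun num => pvMkRow K (pvSufVal M q num)) := by
  have main : ∀ t, t ≤ M+1 →
      ((List.range t).reverse).foldl
        (fun suf num =>
          ((List.range (K+1)).map
            (fun r => ((suf.headD []).getD r 0 + ((dp.getD num []).getD r 0)) % pvMOD)) :: suf)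
        ((List.range' t (M+2-t)).map (fun num => pvMkRow K (pvSufVal M q num)))
      = (List.range' 0 (M+2)).map (fun num => pvMkRow K (pvSufVal M q num)) := by
    intro t
    induction t with
    | zero => intro _; simp
    | succ t ih =>
      intro ht
      have hrev : (List.range (t+1)).reverse = t :: (List.range t).reverse := by
        rw [List.range_succ, List.reverse_append]; rfl
      rw [hrev, List.foldl_cons]
      have hlen1 : M+2-(t+1) = (M+1-t-1)+1 := by omega
      have hstep : ((List.range' (t+1) (M+2-(t+1))).map (fun num => pvMkRow K (pvSufVal M q num))).headD []
          = pvMkRow K (pvSufVal M q (t+1)) := by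
        rw [hlen1, List.range'_succ]
        rfl
      have hbody : (List.range (K+1)).map
            (fun r => ((((List.range' (t+1) (M+2-(t+1))).map (fun num => pvMkRow K (pvSufVal M q num))).headD []).getD r 0
              + ((dp.getD t []).getD r 0)) % pvMOD)
          = pvMkRow K (pvSufVal M q t) := by
        apply List.map_congr_left
        intro r hr
        have hrK : r ≤ K := by have := List.mem_range.mp hr; omega
        rw [hstep]
        unfold pvMkRow
        rw [pv_getD_map_range _ r _ _ (by omega), hdp t r (by omega) hrK]
        unfold pvSufVal
        have hlen2 : M+1-t = (M+1-(t+1))+1 := by omega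
        rw [hlen2, List.range'_succ, List.map_cons, List.sum_cons]
        rw [Int.emod_add_emod]
        ring_nf
      have hcons : (List.range' t (M+2-t)).map (fun num => pvMkRow K (pvSufVal M q num))
          = pvMkRow K (pvSufVal M q t) :: (List.range' (t+1) (M+2-(t+1))).map (fun num => pvMkRow K (pvSufVal M q num)) := by
        have hlen3 : M+2-t = (M+2-(t+1))+1 := by omega
        rw [hlen3, List.range'_succ, List.map_cons]
      rw [hbody, ← hcons]
      exact ih (by omega)
  have hinit : [List.replicate (K+1) (0 : Int)]
      = (List.range' (M+1) (M+2-(M+1))).map (fun num => pvMkRow K (pvSufVal M q num)) := by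
    have h1 : M+2-(M+1) = 1 := by omega
    rw [h1]
    have h2 : List.range' (M+1) 1 = [M+1] := rfl
    rw [h2, List.map_cons, List.map_nil]
    have h3 : pvMkRow K (pvSufVal M q (M+1)) = List.replicate (K+1) (0 : Int) := by
      unfold pvMkRow pvSufVal
      have h4 : M+1-(M+1) = 0 := by omega
      have h5 : (List.range (K+1)).map (fun c => ((List.range' (M+1) (M+1-(M+1))).map (fun v => q v c)).sum % pvMOD)
          = (List.range (K+1)).map (fun _ => (0:Int)) := by
        apply List.map_congr_left
        intro c _
        rw [h4]
        simp
      rw [h5, List.map_const', List.length_range]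
    rw [h3]
  unfold pvSufB
  rw [hinit]
  exact main (M+1) (Nat.le_refl _)

lemma pvB_step (M K : Nat) (q : Nat → Nat → Int) (dp : List (List Int))
    (hdp : ∀ b c, b ≤ M → c ≤ K → (dp.getD b []).getD c 0 = q b c) :
    pvStepB M K dp = pvMkMat M K (pvEntry M q) := by
  unfold pvStepB pvMkMat
  simp only [pv_foldl_append_map, List.nil_append]
  apply List.map_congr_left
  intro ms hms
  have hmsM : ms ≤ M := by have := List.mem_range.mp hms; omega
  unfold pvMkRow
  apply List.map_congr_left
  intro r hr
  have hrK : r ≤ K := by have := List.mem_range.mp hr; omega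
  unfold pvValB pvEntry
  rw [hdp ms r hmsM hrK]
  by_cases hr0 : 0 < r
  · rw [if_pos hr0, if_pos hr0]
    rw [pvB_suf M K q dp hdp, ← List.range_eq_range', pv_getD_map_range _ (ms+1) _ _ (by omega)]
    unfold pvMkRow
    rw [pv_getD_map_range _ (r-1) _ _ (by omega)]
    unfold pvSufVal
    have hlen : M+1-(ms+1) = M - ms := by omega
    rw [hlen, ← Int.add_emod]
  · rw [if_neg hr0, if_neg hr0]

lemma pvB_loop (M K : Nat) : ∀ (L : List Nat) (G : Nat → Nat → Int),
    L.foldl (fun dp _ => pvStepB M K dp) (pvMkMat M K G) = pvMkMat M K (pvIter M L.length G) := by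
  intro L
  induction L with
  | nil => intro G; rfl
  | cons x L ih =>
    intro G
    rw [List.foldl_cons, pvB_step M K G (pvMkMat M K G) (pvB_mk_getD M K G), ih]
    rfl

lemma pvB_eq (n m k : Int) :
    numOfArraysBottomUp_alt n m k = pvIter m.toNat n.toNat pvBase 0 k.toNat := by
  unfold numOfArraysBottomUp_alt
  have hbase : (List.range (m.toNat+1)).map
      (fun _ => (List.range (k.toNat+1)).map (fun r => if r = 0 then (1 : Int) else 0))
      = pvMkMat m.toNat k.toNat pvBase := rfl
  rw [hbase, pvB_loop, List.length_range]
  exact pvB_mk_getD m.toNat k.toNat _ 0 k.toNat (Nat.zero_le _) (Nat.le_refl _)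

-- ===== VERDICT (by name: the statement is the Claim_ definition above) =====
theorem numOfArraysBottomUp_spec : Claim_equal_numOfArraysBottomUp := by
  intro n m k _ _
  unfold Spec_numOfArraysBottomUp
  rw [pvA_eq, pvB_eq]
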